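-- pv_equiv track=rewrite | github.com/kiengit/CTDL-GT-CUOIKY | chuong_6/bai_2.py | Hieu
-- ===== SOURCE A (Python) =====
-- def Hieu(a, b):
--     # Loại bỏ phần tử trùng lặp và sắp xếp mảng a và b
--     unique_a = sorted(set(a))
--     unique_b = sorted(set(b))
--
--     # Khởi tạo mảng kết quả
--     c = []
--
--     # Lặp qua từng phần tử trong mảng a
--     for num in unique_a:
--         # Kiểm tra xem phần tử có tồn tại trong mảng b không
--         if num not in unique_b:
--             # Nếu không tồn tại, thêm vào mảng kết quả
--             c.append(num)
--
--     return c
-- ===== SOURCE B (Python) =====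
-- def Hieu(a, b):
--     ua = sorted(set(a))
--     ub = sorted(set(b))
--     c = []
--     i = 0
--     j = 0
--     while i < len(ua) and j < len(ub):
--         if ua[i] < ub[j]:
--             c.append(ua[i])
--             i += 1
--         elif ua[i] == ub[j]:
--             i += 1
--             j += 1
--         else:
--             j += 1
--     c.extend(ua[i:])
--     return c
-- ===== Notes on version B (the rewrite author's own statement) =====
-- stated objective: faster
-- what changed: Replaces A's per-element linear membership scan of unique_b with a single two-pointer merge over the two sorted unique lists, appending the leftover tail of unique_a.
import Mathlib
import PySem

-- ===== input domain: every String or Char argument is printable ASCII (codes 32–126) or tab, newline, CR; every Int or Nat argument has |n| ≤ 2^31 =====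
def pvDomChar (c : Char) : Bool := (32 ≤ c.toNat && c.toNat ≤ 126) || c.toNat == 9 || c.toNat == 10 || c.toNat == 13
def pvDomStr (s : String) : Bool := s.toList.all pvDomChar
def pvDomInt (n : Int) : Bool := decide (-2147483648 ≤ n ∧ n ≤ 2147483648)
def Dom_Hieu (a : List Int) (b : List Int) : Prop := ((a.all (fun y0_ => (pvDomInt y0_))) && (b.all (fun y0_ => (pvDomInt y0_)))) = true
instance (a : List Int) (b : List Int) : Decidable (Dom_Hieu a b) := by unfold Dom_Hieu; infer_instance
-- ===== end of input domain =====

-- B replaces A's per-element membership scan with a two-pointer merge over the two sorted unique lists (alternative decomposition; same return value).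

-- ===== PORT A =====
def Hieu (a : List Int) (b : List Int) : List Int :=
  let unique_a := PySem.List.sorted (PySem.Set.ofList a) (fun x => x) false
  let unique_b := PySem.List.sorted (PySem.Set.ofList b) (fun x => x) false
  unique_a.foldl (fun c num => if num ∈ unique_b then c else c ++ [num]) []

-- ===== PORT B =====
-- the while-loop over indices i, j of Source B, transcribed as structural recursion on the two lists
def HieuMerge : List Int → List Int → List Int
  | [], _ => []
  | x :: xs, [] => x :: xs
  | x :: xs, y :: ys =>
    if x < y then x :: HieuMerge xs (y :: ys)
    else if x = y then HieuMerge xs ys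
    else HieuMerge (x :: xs) ys

def Hieu_alt (a : List Int) (b : List Int) : List Int :=
  HieuMerge (PySem.List.sorted (PySem.Set.ofList a) (fun x => x) false)
            (PySem.List.sorted (PySem.Set.ofList b) (fun x => x) false)

-- ===== PRECONDITION & SPEC =====
def Spec_Hieu (a : List Int) (b : List Int) (out : List Int) : Prop := out = Hieu_alt a b
instance (a : List Int) (b : List Int) (out : List Int) : Decidable (Spec_Hieu a b out) := by unfold Spec_Hieu; infer_instance

-- ===== CLAIM (what is proved, stated in full; the proofs are below) =====
def Claim_equal_Hieu : Prop := ∀ (a : List Int) (b : List Int), Dom_Hieu a b → Spec_Hieu a b (Hieu a b)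

-- ===== LEMMAS AND PROOFS =====

-- on strictly increasing lists the merge computes exactly the filtered difference
theorem hieuMerge_eq_filter (xs ys : List Int)
    (hx : xs.Pairwise (· < ·)) (hy : ys.Pairwise (· < ·)) :
    HieuMerge xs ys = xs.filter (fun x => decide (x ∉ ys)) := by
  induction xs generalizing ys with
  | nil => simp [HieuMerge]
  | cons x xs ih =>
    induction ys with
    | nil => simp [HieuMerge]
    | cons y ys ihy =>
      rcases List.pairwise_cons.mp hx with ⟨hxall, hx'⟩
      rcases List.pairwise_cons.mp hy with ⟨hyall, hy'⟩
      by_cases hlt : x < y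
      · have hxnot : x ∉ y :: ys := by
          simp only [List.mem_cons]
          rintro (rfl | hmem)
          · exact absurd hlt (lt_irrefl x)
          · exact absurd (lt_trans hlt (hyall _ hmem)) (lt_irrefl x)
        simp only [HieuMerge, if_pos hlt, List.filter_cons]
        rw [ih (y :: ys) hx' hy]
        simp [hxnot]
      · by_cases heq : x = y
        · subst heq
          have hrec := ih ys hx' hy'
          simp only [HieuMerge, if_neg hlt, List.filter_cons]
          rw [hrec]
          simp only [List.mem_cons, true_or, not_true_eq_false, decide_false, Bool.false_eq_true,
            if_false]
          apply List.filter_congr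
          intro z hz
          have hzx : x < z := hxall z hz
          simp only [decide_eq_decide]
          constructor
          · rintro h (rfl | hm)
            · exact absurd hzx (lt_irrefl z)
            · exact h hm
          · intro h hm; exact h (Or.inr hm)
        · have hgt : y < x := lt_of_le_of_ne (not_lt.mp hlt) (Ne.symm heq)
          have hrec := ih ys hx' hy'
          simp only [HieuMerge, if_neg hlt, if_neg heq]
          rw [ihy hy']
          apply List.filter_congr
          intro z hz
          have hyz : y < z := by
            rcases List.mem_cons.mp hz with rfl | hm
            · exact hgt
            · exact lt_trans hgt (hxall z hm)
          simp only [List.mem_cons, decide_eq_decide]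
          constructor
          · rintro h (rfl | hm)
            · exact absurd hyz (lt_irrefl z)
            · exact h hm
          · intro h hm; exact h (Or.inr hm)

-- A's accumulation loop ('if num in unique_b: skip else append') computes the filtered difference
theorem hieu_foldl_eq_filter (ub l acc : List Int) :
    l.foldl (fun c num => if num ∈ ub then c else c ++ [num]) acc
      = acc ++ l.filter (fun x => decide (x ∉ ub)) := by
  induction l generalizing acc with
  | nil => simp
  | cons x l ih =>
    simp only [List.foldl_cons, List.filter_cons, ih]
    by_cases hx : x ∈ ub <;> simp [hx]

-- ===== VERDICT (by name: the statement is the Claim_ definition above) =====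
theorem Hieu_spec : Claim_equal_Hieu := by
  intro a b _
  unfold Spec_Hieu Hieu Hieu_alt
  dsimp only
  rw [hieuMerge_eq_filter _ _ (PySem.List.sorted_ofList_pairwise_lt a)
      (PySem.List.sorted_ofList_pairwise_lt b)]
  rw [hieu_foldl_eq_filter]
  simp
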